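-- pv_equiv track=rewrite | github.com/csabyy/adventofcode | 2025/11/main.py | remove_locations
-- ===== SOURCE A (Python) =====
-- def copy_dictionary(locations):
--     locations_copy = locations.copy()
--     for from_location, to_locations in locations_copy.items():
--         locations_copy[from_location] = locations[from_location].copy()
--     return locations_copy
--
-- def remove_locations(locations, locations_to_remove):
--     locations_copy = copy_dictionary(locations)
--
--     removed_locations = set()
--     for location_key, location_values in locations.items():
--         if location_key in locations_to_remove:
--             locations_copy.pop(location_key)
--         else:
--             for location_value in location_values:
--                 if location_value in locations_to_remove:
--                     locations_copy[location_key].remove(location_value)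
--                     if len(locations_copy[location_key]) == 0:
--                         removed_locations.add(location_key)
--
--     if len(removed_locations) > 0:
--         return remove_locations(locations_copy, removed_locations)
--
--     return locations_copy
-- ===== SOURCE B (Python) =====
-- def remove_locations(locations, locations_to_remove):
--     # Fixpoint on the set of removed ids; the dictionary is never copied or
--     # mutated: we only grow `removed` round by round, then filter once.
--     removed = set(locations_to_remove)
--     while True:
--         newly = [key for key, values in locations.items()
--                  if key not in removed and values
--                  and all(value in removed for value in values)]
--         if not newly:
--             return {key: [value for value in values if value not in removed]
--                     for key, values in locations.items() if key not in removed}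
--         removed.update(newly)
-- ===== Notes on version B (the rewrite author's own statement) =====
-- stated objective: alternative
-- what changed: A recursively deep-copies the dictionary, mutates the copy (pop keys, remove values one occurrence at a time) and recurses on the newly-emptied keys; B never copies or mutates the dictionary: it grows the set of removed ids to a fixpoint round by round and then filters the original dictionary in a single final pass.
import Mathlib
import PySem

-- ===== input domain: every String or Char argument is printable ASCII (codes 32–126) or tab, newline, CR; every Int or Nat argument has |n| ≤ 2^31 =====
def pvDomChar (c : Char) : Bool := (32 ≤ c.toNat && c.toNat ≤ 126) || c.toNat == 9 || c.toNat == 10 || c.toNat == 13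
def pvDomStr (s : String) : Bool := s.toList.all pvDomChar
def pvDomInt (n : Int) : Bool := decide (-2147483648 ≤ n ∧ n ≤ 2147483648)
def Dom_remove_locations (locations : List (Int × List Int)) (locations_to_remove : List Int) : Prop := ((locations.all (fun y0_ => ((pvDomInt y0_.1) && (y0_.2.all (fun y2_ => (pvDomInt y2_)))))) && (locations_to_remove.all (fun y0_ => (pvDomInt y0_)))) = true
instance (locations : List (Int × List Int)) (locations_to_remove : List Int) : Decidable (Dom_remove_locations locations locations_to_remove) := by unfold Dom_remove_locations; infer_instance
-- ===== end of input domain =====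

-- B replaces A's recursive copy-mutate-and-recurse cascade by a single fixpoint loop on the
-- set of removed ids followed by one filtering pass over the untouched dictionary (objective:
-- alternative re-implementation; A mutates only its private copies, so no observable side effects).

-- ===== PORT A =====
def copy_dictionary (locations : PySem.Dict Int (List Int)) : PySem.Dict Int (List Int) :=
  let locations_copy := locations
  locations.items.foldl
    (fun locations_copy p => locations_copy.insert p.1 (PySem.Dict.getD locations p.1 []))
    locations_copy

-- inner 'for location_value in location_values' body of A
def rl_inner (locations_to_remove : List Int) (location_key : Int)
    (st : PySem.Dict Int (List Int) × PySem.Set Int) (location_value : Int) :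
    PySem.Dict Int (List Int) × PySem.Set Int :=
  if location_value ∈ locations_to_remove then
    -- '.remove' never raises here: each occurrence is still present when removed
    let locations_copy := PySem.Dict.modify st.1 location_key []
      (fun l => (PySem.List.remove? l location_value).getD l)
    if (PySem.Dict.getD locations_copy location_key []).length = 0 then
      (locations_copy, PySem.Set.add st.2 location_key)
    else (locations_copy, st.2)
  else st

-- outer 'for location_key, location_values in locations.items()' body of A
def rl_step (locations_to_remove : List Int)
    (st : PySem.Dict Int (List Int) × PySem.Set Int) (p : Int × List Int) :
    PySem.Dict Int (List Int) × PySem.Set Int :=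
  if p.1 ∈ locations_to_remove then (st.1.erase p.1, st.2)
  else p.2.foldl (rl_inner locations_to_remove p.1) st

-- A's recursion, with fuel (locations.length + 2 levels always suffice: every level after the
-- first pops at least one key)
def remove_locations_go (fuel : Nat) (locations : PySem.Dict Int (List Int))
    (locations_to_remove : List Int) : PySem.Dict Int (List Int) :=
  let locations_copy := copy_dictionary locations
  let st := locations.items.foldl (rl_step locations_to_remove) (locations_copy, PySem.Set.empty)
  if 0 < PySem.Set.len st.2 then
    match fuel with
    | 0 => st.1
    | f + 1 => remove_locations_go f st.1 st.2
  else st.1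

def remove_locations (locations : List (Int × List Int)) (locations_to_remove : List Int) : List (Int × List Int) :=
  (remove_locations_go (locations.length + 2) (PySem.Dict.mk locations) locations_to_remove).items

-- ===== PORT B =====
-- B's 'while True' fixpoint loop on the removed set, with fuel (locations.length + 2 rounds
-- always suffice: every round but the last adds at least one key)
def remove_locations_alt_go (locations : List (Int × List Int)) :
    Nat → PySem.Set Int → PySem.Set Int
  | 0, removed => removed
  | fuel + 1, removed =>
    let newly := (locations.filter (fun p =>
        decide (p.1 ∉ removed) && !p.2.isEmpty && p.2.all (fun v => decide (v ∈ removed)))).map Prod.fst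
    if newly.isEmpty then removed
    else remove_locations_alt_go locations fuel (PySem.Set.update removed newly)

def remove_locations_alt (locations : List (Int × List Int)) (locations_to_remove : List Int) : List (Int × List Int) :=
  let removed := remove_locations_alt_go locations (locations.length + 2)
    (PySem.Set.ofList locations_to_remove)
  locations.filterMap (fun p =>
    if p.1 ∈ removed then none else some (p.1, p.2.filter (fun v => decide (v ∉ removed))))

-- ===== PRECONDITION & SPEC =====
-- Pre_ excludes association lists with duplicate keys: they do not represent a Python dict
-- (dict construction already collapses them), so A's behaviour there is accidental.
def Pre_remove_locations (locations : List (Int × List Int)) (locations_to_remove : List Int) : Prop :=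
  (locations.map Prod.fst).Nodup
instance (locations : List (Int × List Int)) (locations_to_remove : List Int) : Decidable (Pre_remove_locations locations locations_to_remove) := by unfold Pre_remove_locations; infer_instance

def pvWitness_remove_locations : (List (Int × List Int)) × List Int :=
  ([(1, [2, 3]), (2, []), (3, [2])], [2])

def Spec_remove_locations (locations : List (Int × List Int)) (locations_to_remove : List Int) (out : List (Int × List Int)) : Prop := out = remove_locations_alt locations locations_to_remove
instance (locations : List (Int × List Int)) (locations_to_remove : List Int) (out : List (Int × List Int)) : Decidable (Spec_remove_locations locations locations_to_remove out) := by unfold Spec_remove_locations; infer_instance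

-- ===== CLAIM (what is proved, stated in full; the proofs are below) =====
def Claim_equal_remove_locations : Prop := ∀ (locations : List (Int × List Int)) (locations_to_remove : List Int), Dom_remove_locations locations locations_to_remove → Pre_remove_locations locations locations_to_remove → Spec_remove_locations locations locations_to_remove (remove_locations locations locations_to_remove)

-- ===== LEMMAS AND PROOFS =====

-- the dictionary after removing every id in T : keys in T dropped, values in T filtered out
def Fm (d : List (Int × List Int)) (T : List Int) : List (Int × List Int) :=
  d.filterMap (fun p =>
    if p.1 ∈ T then none else some (p.1, p.2.filter (fun v => decide (v ∉ T))))

-- the keys whose (nonempty) value list lies entirely inside T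
def Nw (d : List (Int × List Int)) (T : List Int) : List Int :=
  (d.filter (fun p =>
    decide (p.1 ∉ T) && !p.2.isEmpty && p.2.all (fun v => decide (v ∈ T)))).map Prod.fst

-- T is closed for d relative to r: no entry outside T ∪ r has its nonempty values all inside T
def Closed (d : List (Int × List Int)) (T r : List Int) : Prop :=
  ∀ p ∈ d, p.1 ∉ T → p.1 ∉ r → p.2 ≠ [] → ¬ (∀ v ∈ p.2, v ∈ T)

theorem Fm_cons (p : Int × List Int) (d : List (Int × List Int)) (T : List Int) :
    Fm (p :: d) T = if p.1 ∈ T then Fm d T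
      else (p.1, p.2.filter (fun v => decide (v ∉ T))) :: Fm d T := by
  by_cases h : p.1 ∈ T <;> simp [Fm, List.filterMap_cons, h]

theorem Nw_cons (p : Int × List Int) (d : List (Int × List Int)) (X : List Int) :
    Nw (p :: d) X = if p.1 ∉ X ∧ p.2 ≠ [] ∧ (∀ v ∈ p.2, v ∈ X) then p.1 :: Nw d X
      else Nw d X := by
  by_cases hcnd : p.1 ∉ X ∧ p.2 ≠ [] ∧ (∀ v ∈ p.2, v ∈ X)
  · obtain ⟨h1, h2, h3⟩ := hcnd
    rw [if_pos ⟨h1, h2, h3⟩]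
    have hb : (decide (p.1 ∉ X) && !p.2.isEmpty && p.2.all fun v => decide (v ∈ X)) = true := by
      simp [h1, h2, List.all_eq_true, List.isEmpty_iff]
      exact h3
    simp only [Nw, List.filter_cons]
    rw [hb]
    simp
  · rw [if_neg hcnd]
    have hb : (decide (p.1 ∉ X) && !p.2.isEmpty && p.2.all fun v => decide (v ∈ X)) = false := by
      by_cases h1 : p.1 ∈ X
      · simp [h1]
      · by_cases h2 : p.2 = []
        · simp [h1, h2]
        · have h3 : ¬ ∀ v ∈ p.2, v ∈ X := fun h3 => hcnd ⟨h1, h2, h3⟩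
          simp [h1, h2, List.all_eq_true, List.isEmpty_iff]
          push_neg at h3
          exact h3
    simp only [Nw, List.filter_cons]
    rw [hb]
    simp

theorem Fm_empty (d : List (Int × List Int)) : Fm d [] = d := by
  induction d with
  | nil => rfl
  | cons p d ih => rw [Fm_cons, if_neg (by simp), ih]; simp [List.filter_eq_self]

theorem Fm_append (a b : List (Int × List Int)) (T : List Int) :
    Fm (a ++ b) T = Fm a T ++ Fm b T := by
  simp [Fm, List.filterMap_append]

theorem Fm_Fm (d : List (Int × List Int)) (T r : List Int) :
    Fm (Fm d T) r = Fm d (T ++ r) := by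
  induction d with
  | nil => rfl
  | cons p d ih =>
    rw [Fm_cons, Fm_cons]
    by_cases h1 : p.1 ∈ T
    · rw [if_pos h1, if_pos (by simp [h1]), ih]
    · rw [if_neg h1, Fm_cons]
      by_cases h2 : p.1 ∈ r
      · rw [if_pos h2, if_pos (by simp [h2]), ih]
      · have hvals : (p.2.filter (fun v => decide (v ∉ T))).filter (fun v => decide (v ∉ r))
            = p.2.filter (fun v => decide (v ∉ T ++ r)) := by
          rw [List.filter_filter]
          refine List.filter_congr ?_
          intro v _
          by_cases hv1 : v ∈ T <;> by_cases hv2 : v ∈ r <;> simp [hv1, hv2]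
        rw [if_neg h2, if_neg (by simp [h1, h2]), ih, hvals]

theorem keys_Fm_sublist (d : List (Int × List Int)) (T : List Int) :
    ((Fm d T).map Prod.fst).Sublist (d.map Prod.fst) := by
  induction d with
  | nil => simp [Fm]
  | cons p d ih =>
    rw [Fm_cons]
    by_cases h : p.1 ∈ T
    · rw [if_pos h]; simpa using ih.cons p.1
    · rw [if_neg h]; simpa using ih.cons₂ p.1

theorem keys_Fm_sub (d : List (Int × List Int)) (T : List Int) :
    ∀ k ∈ (Fm d T).map Prod.fst, k ∈ d.map Prod.fst :=
  fun _ hk => (keys_Fm_sublist d T).mem hk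

theorem nodup_keys_Fm (d : List (Int × List Int)) (T : List Int)
    (h : (d.map Prod.fst).Nodup) : ((Fm d T).map Prod.fst).Nodup :=
  (keys_Fm_sublist d T).nodup h

theorem map_ite_key_eq_self (l : List (Int × List Int)) (k : Int) (w : List Int)
    (h : k ∉ l.map Prod.fst) :
    l.map (fun p => if (p.1 == k) = true then (k, w) else p) = l := by
  induction l with
  | nil => rfl
  | cons p l ih =>
    simp only [List.map_cons, List.mem_cons, not_or] at h
    have h1 : (p.1 == k) = false := by rw [beq_eq_false_iff_ne]; exact Ne.symm h.1
    simp only [List.map_cons, h1, Bool.false_eq_true, if_false, ih h.2]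

theorem filter_ne_key_eq_self (l : List (Int × List Int)) (k : Int)
    (h : k ∉ l.map Prod.fst) : l.filter (fun p => !(p.1 == k)) = l := by
  induction l with
  | nil => rfl
  | cons p l ih =>
    simp only [List.map_cons, List.mem_cons, not_or] at h
    have h1 : (p.1 == k) = false := by rw [beq_eq_false_iff_ne]; exact Ne.symm h.1
    simp [List.filter_cons, h1, ih h.2]

theorem find?_key_append_cons (D t : List (Int × List Int)) (k : Int) (c : List Int)
    (hD : k ∉ D.map Prod.fst) :
    List.find? (fun p => p.1 == k) (D ++ (k, c) :: t) = some (k, c) := by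
  induction D with
  | nil => simp
  | cons p D ih =>
    simp only [List.map_cons, List.mem_cons, not_or] at hD
    have h1 : (p.1 == k) = false := by rw [beq_eq_false_iff_ne]; exact Ne.symm hD.1
    rw [List.cons_append, List.find?_cons_of_neg (by simp [h1])]
    exact ih hD.2

theorem get?_of_mem_nodup (e : List (Int × List Int)) (q : Int × List Int)
    (hnd : (e.map Prod.fst).Nodup) (hq : q ∈ e) :
    (PySem.Dict.mk e).get? q.1 = some q.2 := by
  induction e with
  | nil => simp at hq
  | cons a e ih =>
    simp only [List.map_cons, List.nodup_cons] at hnd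
    rcases List.mem_cons.mp hq with h | h
    · subst h; simp [PySem.Dict.get?]
    · have hne : (a.1 == q.1) = false := by
        rw [beq_eq_false_iff_ne]
        intro hh; exact hnd.1 (hh ▸ List.mem_map.mpr ⟨q, h, rfl⟩)
      simp only [PySem.Dict.get?, PySem.Dict.items] at ih ⊢
      rw [List.find?_cons_of_neg (by simp [hne])]
      exact ih hnd.2 h

theorem insert_getD_self (e : List (Int × List Int)) (k : Int)
    (hnd : (e.map Prod.fst).Nodup) (hk : (PySem.Dict.mk e).contains k = true) :
    (PySem.Dict.mk e).insert k ((PySem.Dict.mk e).getD k []) = PySem.Dict.mk e := by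
  apply PySem.Dict.ext
  simp only [PySem.Dict.insert, hk, if_true, PySem.Dict.items]
  have hstep : ∀ p ∈ e,
      (if (p.1 == k) = true then (k, (PySem.Dict.mk e).getD k []) else p) = p := by
    intro p hp
    by_cases hpk : (p.1 == k) = true
    · have hk' : p.1 = k := by simpa using hpk
      have hget : (PySem.Dict.mk e).getD k [] = p.2 := by
        rw [← hk']
        simp [PySem.Dict.getD, get?_of_mem_nodup e p hnd hp]
      rw [if_pos hpk, hget, ← hk']
    · rw [if_neg hpk]
  rw [List.map_congr_left hstep]
  simp

theorem copy_fold_fix (e : List (Int × List Int)) (hnd : (e.map Prod.fst).Nodup) :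
    ∀ l : List (Int × List Int), (∀ p ∈ l, p ∈ e) →
    l.foldl (fun acc p => acc.insert p.1 ((PySem.Dict.mk e).getD p.1 [])) (PySem.Dict.mk e)
      = PySem.Dict.mk e := by
  intro l
  induction l with
  | nil => intro _; rfl
  | cons p l ih =>
    intro hl
    have hp : p ∈ e := hl p (by simp)
    have hc : (PySem.Dict.mk e).contains p.1 = true := by
      rw [PySem.Dict.contains_eq_isSome_get?, get?_of_mem_nodup e p hnd hp]; rfl
    rw [List.foldl_cons, insert_getD_self e p.1 hnd hc]
    exact ih (fun q hq => hl q (List.mem_cons_of_mem p hq))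

theorem copy_dictionary_id (e : List (Int × List Int)) (hnd : (e.map Prod.fst).Nodup) :
    copy_dictionary (PySem.Dict.mk e) = PySem.Dict.mk e :=
  copy_fold_fix e hnd e (fun _ hp => hp)

theorem getD_mid (D t : List (Int × List Int)) (k : Int) (c : List Int)
    (hD : k ∉ D.map Prod.fst) :
    (PySem.Dict.mk (D ++ (k, c) :: t)).getD k [] = c := by
  simp [PySem.Dict.getD, PySem.Dict.get?, find?_key_append_cons D t k c hD]

theorem insert_mid (D t : List (Int × List Int)) (k : Int) (c w : List Int)
    (hD : k ∉ D.map Prod.fst) (ht : k ∉ t.map Prod.fst) :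
    (PySem.Dict.mk (D ++ (k, c) :: t)).insert k w = PySem.Dict.mk (D ++ (k, w) :: t) := by
  have hc : (PySem.Dict.mk (D ++ (k, c) :: t)).contains k = true := by
    rw [PySem.Dict.contains_eq_isSome_get?]
    simp [PySem.Dict.get?, find?_key_append_cons D t k c hD]
  apply PySem.Dict.ext
  simp only [PySem.Dict.insert, hc, if_true, PySem.Dict.items]
  rw [List.map_append, List.map_cons, map_ite_key_eq_self D k w hD,
    map_ite_key_eq_self t k w ht]
  simp

theorem erase_mid (D t : List (Int × List Int)) (k : Int) (c : List Int)
    (hD : k ∉ D.map Prod.fst) (ht : k ∉ t.map Prod.fst) :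
    (PySem.Dict.mk (D ++ (k, c) :: t)).erase k = PySem.Dict.mk (D ++ t) := by
  apply PySem.Dict.ext
  simp only [PySem.Dict.erase, PySem.Dict.items]
  rw [List.filter_append, List.filter_cons, filter_ne_key_eq_self D k hD,
    filter_ne_key_eq_self t k ht]
  simp

-- the inner value loop of A, characterised
theorem inner_char (r : List Int) (k : Int) (D t : List (Int × List Int))
    (hD : k ∉ D.map Prod.fst) (ht : k ∉ t.map Prod.fst) :
    ∀ (vs g : List Int) (rem : PySem.Set Int), (∀ x ∈ g, x ∉ r) →
    vs.foldl (rl_inner r k) (PySem.Dict.mk (D ++ (k, g ++ vs) :: t), rem) =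
      (PySem.Dict.mk (D ++ (k, g ++ vs.filter (fun v => decide (v ∉ r))) :: t),
       if g = [] ∧ vs ≠ [] ∧ vs.filter (fun v => decide (v ∉ r)) = []
       then PySem.Set.add rem k else rem) := by
  intro vs
  induction vs with
  | nil => intro g rem _; simp
  | cons v vs ih =>
    intro g rem hg
    rw [List.foldl_cons]
    by_cases hv : v ∈ r
    · have hcur : (PySem.Dict.mk (D ++ (k, g ++ v :: vs) :: t)).getD k [] = g ++ v :: vs :=
        getD_mid D t k _ hD
      have hrem : PySem.List.remove? (g ++ v :: vs) v = some (g ++ vs) := by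
        rw [PySem.List.remove?_eq_some_erase _ v (by simp)]
        rw [List.erase_append_right _ (fun hvg => hg v hvg hv), List.erase_cons_head]
      have hmod : PySem.Dict.modify (PySem.Dict.mk (D ++ (k, g ++ v :: vs) :: t)) k []
          (fun l => (PySem.List.remove? l v).getD l) = PySem.Dict.mk (D ++ (k, g ++ vs) :: t) := by
        simp only [PySem.Dict.modify, hcur, hrem, Option.getD_some]
        exact insert_mid D t k _ _ hD ht
      simp only [rl_inner]
      rw [if_pos hv, hmod, getD_mid D t k (g ++ vs) hD]
      by_cases hgvs : (g ++ vs).length = 0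
      · rw [if_pos hgvs]
        obtain ⟨hg0, hvs0⟩ := List.append_eq_nil_iff.mp (List.length_eq_zero_iff.mp hgvs)
        subst hg0; subst hvs0
        simp [List.filter_cons, hv]
      · rw [if_neg hgvs]
        have hfilter : (v :: vs).filter (fun v => decide (v ∉ r))
            = vs.filter (fun v => decide (v ∉ r)) := by
          simp [List.filter_cons, hv]
        rw [ih g rem hg, hfilter]
        have hc : (g = [] ∧ vs ≠ [] ∧ vs.filter (fun v => decide (v ∉ r)) = []) ↔
            (g = [] ∧ ¬(v :: vs) = [] ∧ vs.filter (fun v => decide (v ∉ r)) = []) := by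
          constructor
          · rintro ⟨h1, _, h3⟩; exact ⟨h1, by simp, h3⟩
          · rintro ⟨h1, _, h3⟩
            refine ⟨h1, ?_, h3⟩
            intro hvs0
            exact hgvs (by rw [h1, hvs0]; rfl)
        rw [if_congr hc rfl rfl]
    · have hg' : ∀ x ∈ g ++ [v], x ∉ r := by
        intro x hx
        rcases List.mem_append.mp hx with h | h
        · exact hg x h
        · rw [List.mem_singleton.mp h]; exact hv
      have hassoc : g ++ v :: vs = (g ++ [v]) ++ vs := by simp
      have hfilter : (v :: vs).filter (fun v => decide (v ∉ r))
          = v :: vs.filter (fun v => decide (v ∉ r)) := by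
        simp [List.filter_cons, hv]
      simp only [rl_inner]
      rw [if_neg hv, hassoc, ih (g ++ [v]) rem hg', hfilter]
      rw [if_neg (by rintro ⟨h1, _, _⟩; simp at h1),
        if_neg (by rintro ⟨_, _, h3⟩; simp at h3)]
      simp

-- the outer key loop of A, characterised
theorem outer_char (r : List Int) :
    ∀ (q pfx : List (Int × List Int)) (rem : PySem.Set Int),
    (((pfx ++ q).map Prod.fst)).Nodup → (∀ x ∈ rem, x ∈ pfx.map Prod.fst) →
    q.foldl (rl_step r) (PySem.Dict.mk (Fm pfx r ++ q), rem) =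
      (PySem.Dict.mk (Fm (pfx ++ q) r), rem ++ Nw q r) := by
  intro q
  induction q with
  | nil =>
    intro pfx rem _ _
    simp [Nw]
  | cons p q ih =>
    intro pfx rem hnd hsub
    obtain ⟨k, vs⟩ := p
    have hnd2 : (pfx.map Prod.fst ++ k :: q.map Prod.fst).Nodup := by simpa using hnd
    obtain ⟨hndp, hndkq, hdisj⟩ := List.nodup_append.mp hnd2
    have hkp : k ∉ pfx.map Prod.fst := fun hk => (hdisj k hk k (by simp)) rfl
    have hkq : k ∉ q.map Prod.fst := (List.nodup_cons.mp hndkq).1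
    have hFmkeys : k ∉ (Fm pfx r).map Prod.fst := fun h => hkp (keys_Fm_sub pfx r k h)
    have hndnext : (((pfx ++ [(k, vs)]) ++ q).map Prod.fst).Nodup := by
      rw [List.append_assoc, List.singleton_append]; exact hnd
    have happ : pfx ++ (k, vs) :: q = (pfx ++ [(k, vs)]) ++ q := by
      rw [List.append_assoc, List.singleton_append]
    rw [List.foldl_cons]
    by_cases hk : k ∈ r
    · have herase : rl_step r (PySem.Dict.mk (Fm pfx r ++ (k, vs) :: q), rem) (k, vs)
          = (PySem.Dict.mk (Fm pfx r ++ q), rem) := by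
        simp only [rl_step]
        rw [if_pos hk, erase_mid (Fm pfx r) q k vs hFmkeys hkq]
      have hFm1 : Fm (pfx ++ [(k, vs)]) r = Fm pfx r := by
        rw [Fm_append]; simp [Fm, hk]
      have hsub' : ∀ x ∈ rem, x ∈ (pfx ++ [(k, vs)]).map Prod.fst := by
        intro x hx; simp only [List.map_append, List.mem_append]
        exact Or.inl (hsub x hx)
      have hih := ih (pfx ++ [(k, vs)]) rem hndnext hsub'
      rw [hFm1] at hih
      rw [herase, hih, happ, Nw_cons, if_neg (by rintro ⟨hx, _, _⟩; exact hx hk)]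
    · have hinner := inner_char r k (Fm pfx r) q hFmkeys hkq vs [] rem (by simp)
      simp only [List.nil_append] at hinner
      have hstep : rl_step r (PySem.Dict.mk (Fm pfx r ++ (k, vs) :: q), rem) (k, vs)
          = (PySem.Dict.mk (Fm pfx r ++ (k, vs.filter (fun v => decide (v ∉ r))) :: q),
             if vs ≠ [] ∧ vs.filter (fun v => decide (v ∉ r)) = []
             then PySem.Set.add rem k else rem) := by
        simp only [rl_step]
        rw [if_neg hk, hinner]
        congr 1
        by_cases hcnd : vs ≠ [] ∧ vs.filter (fun v => decide (v ∉ r)) = [] <;>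
          simp [hcnd]
      have hkrem : k ∉ rem := fun h => hkp (hsub k h)
      have hFm1 : Fm (pfx ++ [(k, vs)]) r
          = Fm pfx r ++ [(k, vs.filter (fun v => decide (v ∉ r)))] := by
        rw [Fm_append]; simp [Fm, hk]
      have hNwc : Nw ((k, vs) :: q) r =
          (if vs ≠ [] ∧ vs.filter (fun v => decide (v ∉ r)) = []
           then k :: Nw q r else Nw q r) := by
        rw [Nw_cons]
        by_cases h1 : vs = []
        · subst h1
          rw [if_neg (by rintro ⟨_, hx, _⟩; exact hx rfl),
            if_neg (by rintro ⟨hx, _⟩; exact hx rfl)]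
        · by_cases h2 : vs.filter (fun v => decide (v ∉ r)) = []
          · have hall : ∀ v ∈ vs, v ∈ r := by
              intro v hv
              by_contra hvr
              have hmem : v ∈ vs.filter (fun v => decide (v ∉ r)) :=
                List.mem_filter.mpr ⟨hv, by simpa using hvr⟩
              rw [h2] at hmem
              simp at hmem
            rw [if_pos ⟨hk, h1, hall⟩, if_pos ⟨h1, h2⟩]
          · have hnall : ¬ ∀ v ∈ vs, v ∈ r := by
              intro hall
              exact h2 (List.filter_eq_nil_iff.mpr (fun a ha => by simpa using hall a ha))
            rw [if_neg (fun hx => hnall hx.2.2), if_neg (fun hx => h2 hx.2)]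
      have hmid : Fm pfx r ++ (k, vs.filter (fun v => decide (v ∉ r))) :: q
          = (Fm pfx r ++ [(k, vs.filter (fun v => decide (v ∉ r)))]) ++ q := by
        rw [List.append_assoc, List.singleton_append]
      rw [hstep]
      by_cases hcond : vs ≠ [] ∧ vs.filter (fun v => decide (v ∉ r)) = []
      · rw [if_pos hcond, PySem.Set.add_of_not_mem hkrem]
        have hsub' : ∀ x ∈ rem ++ [k], x ∈ (pfx ++ [(k, vs)]).map Prod.fst := by
          intro x hx
          simp only [List.map_append, List.mem_append, List.map_cons]
          rcases List.mem_append.mp hx with h | h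
          · exact Or.inl (hsub x h)
          · rw [List.mem_singleton.mp h]; exact Or.inr (by simp)
        have hih := ih (pfx ++ [(k, vs)]) (rem ++ [k]) hndnext hsub'
        rw [hFm1] at hih
        rw [hmid, hih, happ, hNwc, if_pos hcond]
        simp
      · rw [if_neg hcond]
        have hsub' : ∀ x ∈ rem, x ∈ (pfx ++ [(k, vs)]).map Prod.fst := by
          intro x hx; simp only [List.map_append, List.mem_append]
          exact Or.inl (hsub x hx)
        have hih := ih (pfx ++ [(k, vs)]) rem hndnext hsub'
        rw [hFm1] at hih
        rw [hmid, hih, happ, hNwc, if_neg hcond]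

theorem Nw_shift (d : List (Int × List Int)) (T r : List Int) (hc : Closed d T r) :
    Nw (Fm d T) r = Nw d (T ++ r) := by
  induction d with
  | nil => rfl
  | cons p d ih =>
    have hc' : Closed d T r := fun q hq => hc q (List.mem_cons_of_mem p hq)
    have ihq := ih hc'
    obtain ⟨k, vs⟩ := p
    rw [Fm_cons]
    by_cases h1 : k ∈ T
    · rw [if_pos h1, Nw_cons, if_neg (by rintro ⟨hx, _, _⟩; exact hx (by simp [h1])), ihq]
    · rw [if_neg h1, Nw_cons, Nw_cons]
      by_cases h2 : k ∈ r
      · rw [if_neg (by rintro ⟨hx, _, _⟩; exact hx h2),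
          if_neg (by rintro ⟨hx, _, _⟩; exact hx (by simp [h2])), ihq]
      · by_cases hvs : vs = []
        · subst hvs
          rw [if_neg (by rintro ⟨_, hx, _⟩; simp at hx),
            if_neg (by rintro ⟨_, hx, _⟩; simp at hx), ihq]
        · have hnall : ¬ ∀ v ∈ vs, v ∈ T :=
            hc (k, vs) (by simp) h1 h2 hvs
          push_neg at hnall
          obtain ⟨v0, hv0, hv0T⟩ := hnall
          by_cases hall : ∀ v ∈ vs, v ∈ T ++ r
          · have hfne : vs.filter (fun v => decide (v ∉ T)) ≠ [] :=
              List.ne_nil_of_mem (List.mem_filter.mpr ⟨hv0, by simpa using hv0T⟩)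
            have hfr : ∀ v ∈ vs.filter (fun v => decide (v ∉ T)), v ∈ r := by
              intro v hv
              have hv' := List.mem_filter.mp hv
              rcases List.mem_append.mp (hall v hv'.1) with h | h
              · exact absurd h (by simpa using hv'.2)
              · exact h
            rw [if_pos ⟨h2, hfne, hfr⟩, if_pos ⟨by simp [h1, h2], hvs, hall⟩, ihq]
          · push_neg at hall
            obtain ⟨w, hw, hwTr⟩ := hall
            have hwT : w ∉ T := fun hx => hwTr (by simp [hx])
            have hwr : w ∉ r := fun hx => hwTr (by simp [hx])
            have hwf : w ∈ vs.filter (fun v => decide (v ∉ T)) :=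
              List.mem_filter.mpr ⟨hw, by simpa using hwT⟩
            rw [if_neg (by rintro ⟨_, _, h3⟩; exact hwr (h3 w hwf)),
              if_neg (by rintro ⟨_, _, h3⟩; exact hwTr (h3 w hw)), ihq]

theorem mem_Nw (d : List (Int × List Int)) (X : List Int) (k : Int) :
    k ∈ Nw d X ↔ ∃ p ∈ d, p.1 = k ∧ p.1 ∉ X ∧ p.2 ≠ [] ∧ ∀ v ∈ p.2, v ∈ X := by
  induction d with
  | nil => simp [Nw]
  | cons p d ih =>
    rw [Nw_cons]
    by_cases hcnd : p.1 ∉ X ∧ p.2 ≠ [] ∧ (∀ v ∈ p.2, v ∈ X)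
    · rw [if_pos hcnd]
      simp only [List.mem_cons, ih]
      constructor
      · rintro (rfl | ⟨q, hq, hrest⟩)
        · exact ⟨p, Or.inl rfl, rfl, hcnd⟩
        · exact ⟨q, Or.inr hq, hrest⟩
      · rintro ⟨q, (rfl | hq), rfl, hrest⟩
        · exact Or.inl rfl
        · exact Or.inr ⟨q, hq, rfl, hrest⟩
    · rw [if_neg hcnd, ih]
      constructor
      · rintro ⟨q, hq, hrest⟩; exact ⟨q, List.mem_cons_of_mem p hq, hrest⟩
      · rintro ⟨q, hq, rfl, hrest⟩
        rcases List.mem_cons.mp hq with rfl | hq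
        · exact absurd hrest hcnd
        · exact ⟨q, hq, rfl, hrest⟩

theorem Closed_next (d : List (Int × List Int)) (T r : List Int) :
    Closed d (T ++ r) (Nw d (T ++ r)) := by
  intro p hp hT hN hne hall
  exact hN ((mem_Nw d (T ++ r) p.1).mpr ⟨p, hp, rfl, hT, hne, hall⟩)

theorem Nw_fresh (d : List (Int × List Int)) (X : List Int) :
    ∀ k ∈ Nw d X, k ∉ X := by
  intro k hk
  obtain ⟨p, _, rfl, hX, _, _⟩ := (mem_Nw d X k).mp hk
  exact hX

theorem Nw_nodup (d : List (Int × List Int)) (X : List Int)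
    (hnd : (d.map Prod.fst).Nodup) : (Nw d X).Nodup :=
  ((List.Sublist.map Prod.fst List.filter_sublist).nodup hnd)

theorem update_fresh (s xs : List Int) (h : ∀ x ∈ xs, x ∉ s) (hnd : xs.Nodup) :
    PySem.Set.update s xs = s ++ xs := by
  rw [PySem.Set.update_eq_append_filter, PySem.Set.ofList_eq_self_of_nodup xs hnd]
  congr 1
  apply List.filter_eq_self.mpr
  intro x hx
  simp [PySem.Set.contains, h x hx]

-- main lockstep induction: A's recursion tracks B's fixpoint rounds exactly
theorem main_lockstep (d : List (Int × List Int)) (hnd : (d.map Prod.fst).Nodup) :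
    ∀ (fuel : Nat) (T r : List Int), Closed d T r →
    (remove_locations_go fuel (PySem.Dict.mk (Fm d T)) r).items =
      Fm d (remove_locations_alt_go d fuel (T ++ r)) := by
  intro fuel
  induction fuel with
  | zero =>
    intro T r hc
    simp only [remove_locations_go]
    rw [copy_dictionary_id _ (nodup_keys_Fm d T hnd)]
    have houter := outer_char r (Fm d T) [] PySem.Set.empty
      (by simpa using nodup_keys_Fm d T hnd) (by intro x hx; simp [PySem.Set.empty] at hx)
    rw [show Fm [] r = [] from rfl] at houter
    simp only [List.nil_append] at houter
    rw [show (PySem.Set.empty : PySem.Set Int) = [] from rfl] at houter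
    simp only [List.nil_append] at houter
    rw [show (PySem.Set.empty : PySem.Set Int) = ([] : List Int) from rfl, houter,
      Fm_Fm, Nw_shift d T r hc]
    dsimp only
    split <;> rfl
  | succ fuel ih =>
    intro T r hc
    simp only [remove_locations_go]
    rw [copy_dictionary_id _ (nodup_keys_Fm d T hnd)]
    have houter := outer_char r (Fm d T) [] PySem.Set.empty
      (by simpa using nodup_keys_Fm d T hnd) (by intro x hx; simp [PySem.Set.empty] at hx)
    rw [show Fm [] r = [] from rfl] at houter
    simp only [List.nil_append] at houter
    rw [show (PySem.Set.empty : PySem.Set Int) = [] from rfl] at houter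
    simp only [List.nil_append] at houter
    rw [show (PySem.Set.empty : PySem.Set Int) = ([] : List Int) from rfl, houter,
      Fm_Fm, Nw_shift d T r hc]
    dsimp only
    simp only [remove_locations_alt_go]
    rw [show ((d.filter (fun p => decide (p.1 ∉ T ++ r) && !p.2.isEmpty
        && p.2.all (fun v => decide (v ∈ T ++ r)))).map Prod.fst : List Int)
        = Nw d (T ++ r) from rfl]
    by_cases hN : Nw d (T ++ r) = []
    · rw [hN]
      rw [if_neg (by simp [PySem.Set.len])]
      simp
    · have hlen : (0 : Int) < PySem.Set.len (Nw d (T ++ r)) := by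
        simp only [PySem.Set.len]
        exact_mod_cast List.length_pos_iff.mpr hN
      rw [if_pos hlen,
        if_neg (by simp [List.isEmpty_iff, hN]),
        update_fresh (T ++ r) (Nw d (T ++ r)) (Nw_fresh d (T ++ r)) (Nw_nodup d (T ++ r) hnd)]
      exact ih (T ++ r) (Nw d (T ++ r)) (Closed_next d T r)

theorem alt_go_congr (d : List (Int × List Int)) :
    ∀ (fuel : Nat) (T T' : List Int), (∀ x : Int, x ∈ T ↔ x ∈ T') →
    ∀ x : Int, x ∈ remove_locations_alt_go d fuel T ↔ x ∈ remove_locations_alt_go d fuel T' := by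
  intro fuel
  induction fuel with
  | zero => intro T T' h x; exact h x
  | succ fuel ih =>
    intro T T' h x
    have hfilter : d.filter (fun p => decide (p.1 ∉ T) && !p.2.isEmpty
          && p.2.all (fun v => decide (v ∈ T)))
        = d.filter (fun p => decide (p.1 ∉ T') && !p.2.isEmpty
          && p.2.all (fun v => decide (v ∈ T'))) := by
      refine List.filter_congr ?_
      intro p _
      have h1 : decide (p.1 ∉ T) = decide (p.1 ∉ T') := by
        rw [decide_eq_decide]; exact not_congr (h p.1)
      have h2 : p.2.all (fun v => decide (v ∈ T)) = p.2.all (fun v => decide (v ∈ T')) := by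
        rw [show (fun v : Int => decide (v ∈ T)) = fun v => decide (v ∈ T') from
          funext fun v => by rw [decide_eq_decide]; exact h v]
      rw [h1, h2]
    simp only [remove_locations_alt_go]
    rw [hfilter]
    by_cases hemp : ((d.filter (fun p => decide (p.1 ∉ T') && !p.2.isEmpty
        && p.2.all (fun v => decide (v ∈ T')))).map Prod.fst).isEmpty = true
    · rw [if_pos hemp, if_pos hemp]; exact h x
    · rw [if_neg hemp, if_neg hemp]
      exact ih _ _ (fun y => by
        simp only [PySem.Set.mem_update]
        exact or_congr (h y) Iff.rfl) x

theorem Fm_congr (d : List (Int × List Int)) (T T' : List Int)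
    (h : ∀ x : Int, x ∈ T ↔ x ∈ T') : Fm d T = Fm d T' := by
  induction d with
  | nil => rfl
  | cons p d ih =>
    rw [Fm_cons, Fm_cons, ih]
    by_cases hp : p.1 ∈ T
    · rw [if_pos hp, if_pos ((h p.1).mp hp)]
    · rw [if_neg hp, if_neg (fun hx => hp ((h p.1).mpr hx))]
      have hf : p.2.filter (fun v => decide (v ∉ T)) = p.2.filter (fun v => decide (v ∉ T')) :=
        List.filter_congr (fun v _ => by rw [decide_eq_decide]; exact not_congr (h v))
      rw [hf]


-- ===== VERDICT (by name: the statement is the Claim_ definition above) =====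
theorem remove_locations_spec : Claim_equal_remove_locations := by
  intro locations locations_to_remove _hdom hpre
  unfold Spec_remove_locations remove_locations remove_locations_alt
  have h := main_lockstep locations hpre (locations.length + 2) [] locations_to_remove
    (by intro p _ _ _ hne hall; exact hne (List.eq_nil_iff_forall_not_mem.mpr
      (fun v hv => by simpa using hall v hv)))
  rw [show PySem.Dict.mk locations = PySem.Dict.mk (Fm locations []) by rw [Fm_empty]]
  rw [h, List.nil_append]
  exact Fm_congr _ _ _ (alt_go_congr _ _ _ _ (by simp [PySem.Set.mem_ofList]))
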